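-- pv_equiv track=rewrite | github.com/kmuthusi/ke-public-health-app | ke-public-health-app/server.py | choose_diverse_supplemental_alerts
-- ===== SOURCE A (Python) =====
-- def choose_diverse_supplemental_alerts(alerts: list[dict], selected: list[dict], limit: int = 12) -> list[dict]:
--     seen = {(item.get("title"), item.get("url"), item.get("sourceFamily")) for item in selected}
--     result = list(selected)
--     represented_families = {item.get("sourceFamily") for item in selected}
--
--     for alert in alerts:
--         key = (alert.get("title"), alert.get("url"), alert.get("sourceFamily"))
--         family = alert.get("sourceFamily")
--         if key in seen:
--             continue
--         if family not in represented_families: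
--             result.append(alert)
--             seen.add(key)
--             represented_families.add(family)
--         if len(result) >= limit:
--             return result[:limit]
--
--     for alert in alerts:
--         key = (alert.get("title"), alert.get("url"), alert.get("sourceFamily"))
--         if key in seen:
--             continue
--         result.append(alert)
--         seen.add(key)
--         if len(result) >= limit:
--             break
--
--     return result[:limit]
-- ===== SOURCE B (Python) =====
-- def choose_diverse_supplemental_alerts(alerts: list[dict], selected: list[dict], limit: int = 12) -> list[dict]:
--     # One partitioning pass: split the unseen alerts into family-diverse picks and fillers,
--     # then assemble and truncate once at the end.
--     seen = {(item.get("title"), item.get("url"), item.get("sourceFamily")) for item in selected}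
--     represented = {item.get("sourceFamily") for item in selected}
--     diverse = []
--     fill = []
--     for alert in alerts:
--         key = (alert.get("title"), alert.get("url"), alert.get("sourceFamily"))
--         if key in seen:
--             continue
--         seen.add(key)
--         if alert.get("sourceFamily") not in represented:
--             represented.add(alert.get("sourceFamily"))
--             diverse.append(alert)
--         else:
--             fill.append(alert)
--     return (list(selected) + diverse + fill)[:limit]
-- ===== Notes on version B (the rewrite author's own statement) =====
-- stated objective: simpler
-- what changed: Replaces A's two sequential scans of alerts with interleaved early-exit returns by a single partitioning pass (diverse vs fill, with seen-dedup folded into it) followed by one final concatenation and slice. Pre_ excludes negative limits, where A's value from the Python slice result[:limit] (counting from the end) depends on which of its three return statements fires — an accident of the implementation — while B slices the fully assembled list.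
import Mathlib
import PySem

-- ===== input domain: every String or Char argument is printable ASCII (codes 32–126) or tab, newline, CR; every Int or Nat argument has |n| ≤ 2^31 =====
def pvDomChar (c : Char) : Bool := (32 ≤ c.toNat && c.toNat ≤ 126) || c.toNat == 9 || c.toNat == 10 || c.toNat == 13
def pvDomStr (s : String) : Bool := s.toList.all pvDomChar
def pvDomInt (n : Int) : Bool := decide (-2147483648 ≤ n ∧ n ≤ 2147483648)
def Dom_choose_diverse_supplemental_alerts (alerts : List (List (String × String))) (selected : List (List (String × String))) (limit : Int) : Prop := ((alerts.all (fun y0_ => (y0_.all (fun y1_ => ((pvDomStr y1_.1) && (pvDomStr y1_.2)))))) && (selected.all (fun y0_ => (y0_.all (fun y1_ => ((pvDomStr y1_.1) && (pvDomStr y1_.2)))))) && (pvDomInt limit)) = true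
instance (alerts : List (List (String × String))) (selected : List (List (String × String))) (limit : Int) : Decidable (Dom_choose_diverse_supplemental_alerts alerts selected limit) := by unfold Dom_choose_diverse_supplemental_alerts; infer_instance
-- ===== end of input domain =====

-- B replaces A's two sequential scans with interleaved early returns by one partitioning pass and a single final slice (objective: simpler).

-- shared dict/key helpers (both Pythons compute the same .get(...) expressions)
abbrev PvAlert := List (String × String)
abbrev PvK := Option String × Option String × Option String

def pvGet (a : PvAlert) (k : String) : Option String := (PySem.Dict.mk a).get? k
def pvKey (a : PvAlert) : PvK := (pvGet a "title", pvGet a "url", pvGet a "sourceFamily")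

-- ===== PORT A =====
-- first 'for' loop of A: .inl r = the early 'return result[:limit]' fired with value r; .inr (seen, result) = loop finished
def pvPhase1 (limit : Int) : List PvAlert → PySem.Set PvK → PySem.Set (Option String) → List PvAlert →
    (List PvAlert) ⊕ (PySem.Set PvK × List PvAlert)
  | [], seen, _fams, result => .inr (seen, result)
  | a :: rest, seen, fams, result =>
    if pvKey a ∈ seen then pvPhase1 limit rest seen fams result
    else if pvGet a "sourceFamily" ∉ fams then
      let result' := result ++ [a]
      if limit ≤ (result'.length : Int) then .inl (PySem.List.slice result' none (some limit))
      else pvPhase1 limit rest (PySem.Set.add seen (pvKey a)) (PySem.Set.add fams (pvGet a "sourceFamily")) result'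
    else
      if limit ≤ (result.length : Int) then .inl (PySem.List.slice result none (some limit))
      else pvPhase1 limit rest seen fams result

-- second 'for' loop of A (with its 'break')
def pvPhase2 (limit : Int) : List PvAlert → PySem.Set PvK → List PvAlert → List PvAlert
  | [], _, result => result
  | a :: rest, seen, result =>
    if pvKey a ∈ seen then pvPhase2 limit rest seen result
    else
      let result' := result ++ [a]
      if limit ≤ (result'.length : Int) then result'
      else pvPhase2 limit rest (PySem.Set.add seen (pvKey a)) result'

def choose_diverse_supplemental_alerts (alerts : List (List (String × String))) (selected : List (List (String × String))) (limit : Int) : List (List (String × String)) :=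
  let seen := PySem.Set.ofList (selected.map pvKey)
  let fams := PySem.Set.ofList (selected.map (fun i => pvGet i "sourceFamily"))
  match pvPhase1 limit alerts seen fams selected with
  | .inl r => r
  | .inr p => PySem.List.slice (pvPhase2 limit alerts p.1 p.2) none (some limit)

-- ===== PORT B =====
-- single partitioning pass of Source B: accumulates (diverse, fill)
def pvPartition : List PvAlert → PySem.Set PvK → PySem.Set (Option String) → List PvAlert → List PvAlert →
    List PvAlert × List PvAlert
  | [], _, _, diverse, fill => (diverse, fill)
  | a :: rest, seen, fams, diverse, fill =>
    if pvKey a ∈ seen then pvPartition rest seen fams diverse fill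
    else if pvGet a "sourceFamily" ∉ fams then
      pvPartition rest (PySem.Set.add seen (pvKey a)) (PySem.Set.add fams (pvGet a "sourceFamily")) (diverse ++ [a]) fill
    else
      pvPartition rest (PySem.Set.add seen (pvKey a)) fams diverse (fill ++ [a])

def choose_diverse_supplemental_alerts_alt (alerts : List (List (String × String))) (selected : List (List (String × String))) (limit : Int) : List (List (String × String)) :=
  let seen := PySem.Set.ofList (selected.map pvKey)
  let fams := PySem.Set.ofList (selected.map (fun i => pvGet i "sourceFamily"))
  let p := pvPartition alerts seen fams [] []
  PySem.List.slice (selected ++ p.1 ++ p.2) none (some limit)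

-- ===== PRECONDITION & SPEC =====
-- Pre_ excludes negative limits, on which A still returns a value: there the Python slice result[:limit]
-- counts from the end and A's value depends on which of its three return statements fires — an accident of
-- the implementation — while B slices the fully assembled list; neither value is specified behaviour.
def Pre_choose_diverse_supplemental_alerts (alerts : List (List (String × String))) (selected : List (List (String × String))) (limit : Int) : Prop := 0 ≤ limit
instance (alerts : List (List (String × String))) (selected : List (List (String × String))) (limit : Int) : Decidable (Pre_choose_diverse_supplemental_alerts alerts selected limit) := by unfold Pre_choose_diverse_supplemental_alerts; infer_instance

def pvWitness_choose_diverse_supplemental_alerts : (List (List (String × String))) × (List (List (String × String))) × Int :=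
  ([[("title", "a"), ("sourceFamily", "x")], [("title", "b"), ("sourceFamily", "x")]], [[("title", "c"), ("sourceFamily", "y")]], 3)

def Spec_choose_diverse_supplemental_alerts (alerts : List (List (String × String))) (selected : List (List (String × String))) (limit : Int) (out : List (List (String × String))) : Prop := out = choose_diverse_supplemental_alerts_alt alerts selected limit
instance (alerts : List (List (String × String))) (selected : List (List (String × String))) (limit : Int) (out : List (List (String × String))) : Decidable (Spec_choose_diverse_supplemental_alerts alerts selected limit out) := by unfold Spec_choose_diverse_supplemental_alerts; infer_instance

-- ===== CLAIM (what is proved, stated in full; the proofs are below) =====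
def Claim_equal_choose_diverse_supplemental_alerts : Prop := ∀ (alerts : List (List (String × String))) (selected : List (List (String × String))) (limit : Int), Dom_choose_diverse_supplemental_alerts alerts selected limit → Pre_choose_diverse_supplemental_alerts alerts selected limit → Spec_choose_diverse_supplemental_alerts alerts selected limit (choose_diverse_supplemental_alerts alerts selected limit)

-- ===== LEMMAS AND PROOFS =====

-- cons-building form of B's partition pass (proof-level view of pvPartition)
def pvBp : List PvAlert → PySem.Set PvK → PySem.Set (Option String) → List PvAlert × List PvAlert
  | [], _, _ => ([], [])
  | a :: rest, seen, fams =>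
    if pvKey a ∈ seen then pvBp rest seen fams
    else if pvGet a "sourceFamily" ∉ fams then
      let p := pvBp rest (PySem.Set.add seen (pvKey a)) (PySem.Set.add fams (pvGet a "sourceFamily"))
      (a :: p.1, p.2)
    else
      let p := pvBp rest (PySem.Set.add seen (pvKey a)) fams
      (p.1, a :: p.2)

-- the fill alerts phase 2 would append, with the dedup additions kept in a separate set e
def pvFl : List PvAlert → PySem.Set PvK → PySem.Set PvK → List PvAlert
  | [], _, _ => []
  | a :: rest, s, e =>
    if pvKey a ∈ s ∨ pvKey a ∈ e then pvFl rest s e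
    else a :: pvFl rest s (PySem.Set.add e (pvKey a))

lemma pvPartition_eq_bp : ∀ (alerts : List PvAlert) seen fams d f,
    pvPartition alerts seen fams d f = (d ++ (pvBp alerts seen fams).1, f ++ (pvBp alerts seen fams).2) := by
  intro alerts
  induction alerts with
  | nil => intro seen fams d f; simp [pvPartition, pvBp]
  | cons a rest ih =>
    intro seen fams d f
    simp only [pvPartition, pvBp]
    split_ifs with h1 h2
    · exact ih seen fams d f
    · rw [ih]; simp
    · rw [ih]; simp

lemma pvTake_prefix (limit : Int) (hl : 0 ≤ limit) (xs ys : List PvAlert) (h : limit ≤ (xs.length : Int)) :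
    (xs ++ ys).take limit.toNat = xs.take limit.toNat :=
  List.take_append_of_le_length (by omega)

-- phase 2 truncated is acc ++ the fills, truncated
lemma pvPhase2_take (limit : Int) (hl : 0 ≤ limit) :
    ∀ (alerts : List PvAlert) (s2 s e : PySem.Set PvK) (acc : List PvAlert),
      (∀ k, k ∈ s2 ↔ k ∈ s ∨ k ∈ e) →
      (pvPhase2 limit alerts s2 acc).take limit.toNat = (acc ++ pvFl alerts s e).take limit.toNat := by
  intro alerts
  induction alerts with
  | nil => intro s2 s e acc _; simp [pvPhase2, pvFl]
  | cons a rest ih =>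
    intro s2 s e acc hmem
    simp only [pvPhase2, pvFl]
    by_cases h1 : pvKey a ∈ s2
    · rw [if_pos h1, if_pos ((hmem _).mp h1)]
      exact ih s2 s e acc hmem
    · rw [if_neg h1, if_neg (fun hc => h1 ((hmem _).mpr hc))]
      by_cases h2 : limit ≤ ((acc ++ [a]).length : Int)
      · rw [if_pos h2]
        rw [show acc ++ a :: pvFl rest s (PySem.Set.add e (pvKey a)) =
              (acc ++ [a]) ++ pvFl rest s (PySem.Set.add e (pvKey a)) by simp]
        exact (pvTake_prefix limit hl _ _ h2).symm
      · rw [if_neg h2]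
        rw [show acc ++ a :: pvFl rest s (PySem.Set.add e (pvKey a)) =
              (acc ++ [a]) ++ pvFl rest s (PySem.Set.add e (pvKey a)) by simp]
        refine ih _ s _ (acc ++ [a]) ?_
        intro k
        constructor
        · intro hk
          rcases (PySem.Set.mem_add _ _ _).mp hk with hk | hk
          · rcases (hmem k).mp hk with h | h
            · exact Or.inl h
            · exact Or.inr ((PySem.Set.mem_add _ _ _).mpr (Or.inl h))
          · exact Or.inr ((PySem.Set.mem_add _ _ _).mpr (Or.inr hk))
        · intro hk
          rcases hk with h | h
          · exact (PySem.Set.mem_add _ _ _).mpr (Or.inl ((hmem k).mpr (Or.inl h)))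
          · rcases (PySem.Set.mem_add _ _ _).mp h with h | h
            · exact (PySem.Set.mem_add _ _ _).mpr (Or.inl ((hmem k).mpr (Or.inr h)))
            · exact (PySem.Set.mem_add _ _ _).mpr (Or.inr h)

lemma pvPhase1_mono (limit : Int) : ∀ (alerts : List PvAlert) S fams acc s1 r1,
    pvPhase1 limit alerts S fams acc = .inr (s1, r1) → ∀ k, k ∈ S → k ∈ s1 := by
  intro alerts
  induction alerts with
  | nil =>
    intro S fams acc s1 r1 h k hk
    simp only [pvPhase1, Sum.inr.injEq, Prod.mk.injEq] at h
    rw [← h.1]; exact hk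
  | cons a rest ih =>
    intro S fams acc s1 r1 h k hk
    simp only [pvPhase1] at h
    split_ifs at h with h1 h2 h3 h4
    · exact ih S fams acc s1 r1 h k hk
    · exact ih S fams acc s1 r1 h k hk
    · exact ih _ _ _ s1 r1 h k ((PySem.Set.mem_add _ _ _).mpr (Or.inl hk))

lemma pvPhase1_new (limit : Int) : ∀ (alerts : List PvAlert) S fams acc s1 r1,
    pvPhase1 limit alerts S fams acc = .inr (s1, r1) → ∀ k : PvK, k ∈ s1 → k ∈ S ∨ k.2.2 ∉ fams := by
  intro alerts
  induction alerts with
  | nil =>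
    intro S fams acc s1 r1 h k hk
    simp only [pvPhase1, Sum.inr.injEq, Prod.mk.injEq] at h
    rw [← h.1] at hk; exact Or.inl hk
  | cons a rest ih =>
    intro S fams acc s1 r1 h k hk
    simp only [pvPhase1] at h
    split_ifs at h with h1 h2 h3 h4
    · exact ih S fams acc s1 r1 h k hk
    · exact ih S fams acc s1 r1 h k hk
    · rcases ih _ _ _ s1 r1 h k hk with hS | hf
      · rcases (PySem.Set.mem_add _ _ _).mp hS with hS | hS
        · exact Or.inl hS
        · subst hS
          exact Or.inr h2
      · exact Or.inr (fun hc => hf ((PySem.Set.mem_add _ _ _).mpr (Or.inl hc)))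

-- main invariant: A's phase 1 with pending phase-2 fills equals selected ++ diverse ++ fills, truncated
lemma pvMain (limit : Int) (hl : 0 ≤ limit) :
    ∀ (alerts : List PvAlert) (SA SB : PySem.Set PvK) (fams : PySem.Set (Option String))
      (acc F0 : List PvAlert) (E : PySem.Set PvK),
      (∀ k : PvK, k ∈ SA → k.2.2 ∈ fams) →
      (∀ k : PvK, k ∈ SA → k ∈ SB) →
      (∀ k : PvK, k ∉ SA → (k ∈ SB ↔ k ∈ E)) →
      (∀ k : PvK, k ∈ E → k.2.2 ∈ fams) →
      (match pvPhase1 limit alerts SA fams acc with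
       | .inl r => r
       | .inr p => (p.2 ++ F0 ++ pvFl alerts p.1 E).take limit.toNat)
      = (acc ++ (pvBp alerts SB fams).1 ++ F0 ++ (pvBp alerts SB fams).2).take limit.toNat := by
  intro alerts
  induction alerts with
  | nil =>
    intro SA SB fams acc F0 E H1 H2 H3 H4
    simp [pvPhase1, pvFl, pvBp]
  | cons a rest ih =>
    intro SA SB fams acc F0 E H1 H2 H3 H4
    by_cases h1 : pvKey a ∈ SA
    · -- duplicate of an already-seen key: skipped everywhere
      have hSB : pvKey a ∈ SB := H2 _ h1
      have eA : pvPhase1 limit (a :: rest) SA fams acc = pvPhase1 limit rest SA fams acc := by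
        simp [pvPhase1, h1]
      have eB : pvBp (a :: rest) SB fams = pvBp rest SB fams := by
        simp [pvBp, hSB]
      rw [eA, eB]
      have hIH := ih SA SB fams acc F0 E H1 H2 H3 H4
      rcases hph : pvPhase1 limit rest SA fams acc with r | p
      · rw [hph] at hIH; simpa using hIH
      · rw [hph] at hIH
        have hm : pvKey a ∈ p.1 :=
          pvPhase1_mono limit rest SA fams acc p.1 p.2 (by rw [hph]) (pvKey a) h1
        have eF : pvFl (a :: rest) p.1 E = pvFl rest p.1 E := by
          simp [pvFl, hm]
        simpa [eF] using hIH
    · by_cases h2 : pvGet a "sourceFamily" ∈ fams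
      · -- family already represented: phase 1 leaves state unchanged (fill-destined alert)
        have eA : pvPhase1 limit (a :: rest) SA fams acc =
            (if limit ≤ (acc.length : Int) then .inl (PySem.List.slice acc none (some limit))
             else pvPhase1 limit rest SA fams acc) := by
          simp [pvPhase1, h1, h2]
        by_cases hlim : limit ≤ (acc.length : Int)
        · rw [eA, if_pos hlim]
          show PySem.List.slice acc none (some limit) = _
          rw [show acc ++ (pvBp (a :: rest) SB fams).1 ++ F0 ++ (pvBp (a :: rest) SB fams).2 =
                acc ++ ((pvBp (a :: rest) SB fams).1 ++ F0 ++ (pvBp (a :: rest) SB fams).2) by simp]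
          rw [pvTake_prefix limit hl acc _ hlim, PySem.List.slice_to _ hl]
        · rw [eA, if_neg hlim]
          by_cases hE : pvKey a ∈ E
          · have hSB : pvKey a ∈ SB := (H3 _ h1).mpr hE
            have eB : pvBp (a :: rest) SB fams = pvBp rest SB fams := by
              simp [pvBp, hSB]
            rw [eB]
            have hIH := ih SA SB fams acc F0 E H1 H2 H3 H4
            rcases hph : pvPhase1 limit rest SA fams acc with r | p
            · rw [hph] at hIH; simpa using hIH
            · rw [hph] at hIH
              have eF : pvFl (a :: rest) p.1 E = pvFl rest p.1 E := by
                simp [pvFl, hE]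
              simpa [eF] using hIH
          · have hSB : pvKey a ∉ SB := fun hc => hE ((H3 _ h1).mp hc)
            have eB : pvBp (a :: rest) SB fams =
                ((pvBp rest (PySem.Set.add SB (pvKey a)) fams).1,
                 a :: (pvBp rest (PySem.Set.add SB (pvKey a)) fams).2) := by
              simp [pvBp, hSB, h2]
            have H2' : ∀ k : PvK, k ∈ SA → k ∈ PySem.Set.add SB (pvKey a) :=
              fun k hk => (PySem.Set.mem_add _ _ _).mpr (Or.inl (H2 _ hk))
            have H3' : ∀ k : PvK, k ∉ SA → (k ∈ PySem.Set.add SB (pvKey a) ↔ k ∈ PySem.Set.add E (pvKey a)) := by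
              intro k hk
              rw [PySem.Set.mem_add, PySem.Set.mem_add]
              exact or_congr (H3 _ hk) Iff.rfl
            have H4' : ∀ k : PvK, k ∈ PySem.Set.add E (pvKey a) → k.2.2 ∈ fams := by
              intro k hk
              rcases (PySem.Set.mem_add _ _ _).mp hk with hk | hk
              · exact H4 _ hk
              · subst hk; exact h2
            have hIH := ih SA (PySem.Set.add SB (pvKey a)) fams acc (F0 ++ [a]) (PySem.Set.add E (pvKey a)) H1 H2' H3' H4'
            rcases hph : pvPhase1 limit rest SA fams acc with r | p
            · rw [hph] at hIH
              rw [eB]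
              simpa using hIH
            · rw [hph] at hIH
              have hp1 : pvKey a ∉ p.1 := by
                intro hc
                rcases pvPhase1_new limit rest SA fams acc p.1 p.2 (by rw [hph]) (pvKey a) hc with h | h
                · exact h1 h
                · exact h h2
              have eF : pvFl (a :: rest) p.1 E = a :: pvFl rest p.1 (PySem.Set.add E (pvKey a)) := by
                simp [pvFl, hp1, hE]
              rw [eB]
              simp only at hIH ⊢
              rw [eF]
              rw [show p.2 ++ F0 ++ a :: pvFl rest p.1 (PySem.Set.add E (pvKey a)) =
                    p.2 ++ (F0 ++ [a]) ++ pvFl rest p.1 (PySem.Set.add E (pvKey a)) by simp]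
              rw [hIH]
              simp
      · -- new family: phase 1 takes the alert (diverse)
        have hE : pvKey a ∉ E := fun hc => h2 (H4 _ hc)
        have hSB : pvKey a ∉ SB := fun hc => hE ((H3 _ h1).mp hc)
        have eA : pvPhase1 limit (a :: rest) SA fams acc =
            (if limit ≤ ((acc ++ [a]).length : Int) then .inl (PySem.List.slice (acc ++ [a]) none (some limit))
             else pvPhase1 limit rest (PySem.Set.add SA (pvKey a)) (PySem.Set.add fams (pvGet a "sourceFamily")) (acc ++ [a])) := by
          simp [pvPhase1, h1, h2]
        have eB : pvBp (a :: rest) SB fams =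
            (a :: (pvBp rest (PySem.Set.add SB (pvKey a)) (PySem.Set.add fams (pvGet a "sourceFamily"))).1,
             (pvBp rest (PySem.Set.add SB (pvKey a)) (PySem.Set.add fams (pvGet a "sourceFamily"))).2) := by
          simp [pvBp, hSB, h2]
        by_cases hlim : limit ≤ ((acc ++ [a]).length : Int)
        · rw [eA, if_pos hlim, eB]
          show PySem.List.slice (acc ++ [a]) none (some limit) = _
          rw [show acc ++ (a :: (pvBp rest (PySem.Set.add SB (pvKey a)) (PySem.Set.add fams (pvGet a "sourceFamily"))).1) ++ F0 ++ (pvBp rest (PySem.Set.add SB (pvKey a)) (PySem.Set.add fams (pvGet a "sourceFamily"))).2 =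
                (acc ++ [a]) ++ ((pvBp rest (PySem.Set.add SB (pvKey a)) (PySem.Set.add fams (pvGet a "sourceFamily"))).1 ++ F0 ++ (pvBp rest (PySem.Set.add SB (pvKey a)) (PySem.Set.add fams (pvGet a "sourceFamily"))).2) by simp]
          rw [pvTake_prefix limit hl _ _ hlim, PySem.List.slice_to _ hl]
        · have H1' : ∀ k : PvK, k ∈ PySem.Set.add SA (pvKey a) → k.2.2 ∈ PySem.Set.add fams (pvGet a "sourceFamily") := by
            intro k hk
            rcases (PySem.Set.mem_add _ _ _).mp hk with hk | hk
            · exact (PySem.Set.mem_add _ _ _).mpr (Or.inl (H1 _ hk))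
            · subst hk; exact (PySem.Set.mem_add _ _ _).mpr (Or.inr rfl)
          have H2' : ∀ k : PvK, k ∈ PySem.Set.add SA (pvKey a) → k ∈ PySem.Set.add SB (pvKey a) := by
            intro k hk
            rcases (PySem.Set.mem_add _ _ _).mp hk with hk | hk
            · exact (PySem.Set.mem_add _ _ _).mpr (Or.inl (H2 _ hk))
            · exact (PySem.Set.mem_add _ _ _).mpr (Or.inr hk)
          have H3' : ∀ k : PvK, k ∉ PySem.Set.add SA (pvKey a) → (k ∈ PySem.Set.add SB (pvKey a) ↔ k ∈ E) := by
            intro k hk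
            have hkSA : k ∉ SA := fun hc => hk ((PySem.Set.mem_add _ _ _).mpr (Or.inl hc))
            have hkne : k ≠ pvKey a := fun hc => hk ((PySem.Set.mem_add _ _ _).mpr (Or.inr hc))
            rw [PySem.Set.mem_add]
            constructor
            · rintro (h | h)
              · exact (H3 _ hkSA).mp h
              · exact absurd h hkne
            · intro h
              exact Or.inl ((H3 _ hkSA).mpr h)
          have H4' : ∀ k : PvK, k ∈ E → k.2.2 ∈ PySem.Set.add fams (pvGet a "sourceFamily") :=
            fun k hk => (PySem.Set.mem_add _ _ _).mpr (Or.inl (H4 _ hk))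
          have hIH := ih (PySem.Set.add SA (pvKey a)) (PySem.Set.add SB (pvKey a)) (PySem.Set.add fams (pvGet a "sourceFamily")) (acc ++ [a]) F0 E H1' H2' H3' H4'
          rw [eA, if_neg hlim, eB]
          rcases hph : pvPhase1 limit rest (PySem.Set.add SA (pvKey a)) (PySem.Set.add fams (pvGet a "sourceFamily")) (acc ++ [a]) with r | p
          · rw [hph] at hIH
            simpa using hIH
          · rw [hph] at hIH
            have hm : pvKey a ∈ p.1 :=
              pvPhase1_mono limit rest _ _ _ p.1 p.2 (by rw [hph]) (pvKey a)
                ((PySem.Set.mem_add _ _ _).mpr (Or.inr rfl))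
            have eF : pvFl (a :: rest) p.1 E = pvFl rest p.1 E := by
              simp [pvFl, hm]
            simp only at hIH ⊢
            rw [eF, hIH]
            simp

-- ===== VERDICT (by name: the statement is the Claim_ definition above) =====
theorem choose_diverse_supplemental_alerts_spec : Claim_equal_choose_diverse_supplemental_alerts := by
  intro alerts selected limit _hDom hPre
  have hl : 0 ≤ limit := hPre
  unfold Spec_choose_diverse_supplemental_alerts
  simp only [choose_diverse_supplemental_alerts, choose_diverse_supplemental_alerts_alt]
  rw [pvPartition_eq_bp]
  have H1 : ∀ k : PvK, k ∈ PySem.Set.ofList (selected.map pvKey) →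
      k.2.2 ∈ PySem.Set.ofList (selected.map fun i => pvGet i "sourceFamily") := by
    intro k hk
    rcases List.mem_map.mp ((PySem.Set.mem_ofList _ _).mp hk) with ⟨i, hi, rfl⟩
    exact (PySem.Set.mem_ofList _ _).mpr (List.mem_map.mpr ⟨i, hi, rfl⟩)
  have H3 : ∀ k : PvK, k ∉ PySem.Set.ofList (selected.map pvKey) →
      (k ∈ PySem.Set.ofList (selected.map pvKey) ↔ k ∈ ([] : PySem.Set PvK)) := by
    intro k hk
    exact ⟨fun hc => absurd hc hk, fun hc => absurd hc (List.not_mem_nil)⟩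
  have main := pvMain limit hl alerts (PySem.Set.ofList (selected.map pvKey))
    (PySem.Set.ofList (selected.map pvKey))
    (PySem.Set.ofList (selected.map fun i => pvGet i "sourceFamily"))
    selected [] ([] : PySem.Set PvK) H1 (fun _ hk => hk) H3
    (fun _ hk => absurd hk (List.not_mem_nil))
  rcases hph : pvPhase1 limit alerts (PySem.Set.ofList (selected.map pvKey))
      (PySem.Set.ofList (selected.map fun i => pvGet i "sourceFamily")) selected with r | p
  · rw [hph] at main
    rw [PySem.List.slice_to _ hl]
    simpa using main
  · rw [hph] at main
    rw [PySem.List.slice_to _ hl]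
    show PySem.List.slice (pvPhase2 limit alerts p.1 p.2) none (some limit) = _
    rw [PySem.List.slice_to _ hl]
    rw [pvPhase2_take limit hl alerts p.1 p.1 ([] : PySem.Set PvK) p.2 (by intro k; simp)]
    simpa using main
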